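-- pv_equiv track=rewrite | github.com/deevena30/LogFile_Analysis | app.py | lineplot_filtered
-- ===== SOURCE A (Python) =====
-- def lineplot_filtered(filtered_data):
--     eventcount = {}
--     for row in filtered_data:
--         time1 = row[1].strip()
--         time = time1[:24]# Adjust this based on your timestamp format
--
--         if time in eventcount:
--             eventcount[time] += 1
--         else:
--             eventcount[time] = 1
--
--     timexaxis = list(sorted(eventcount.keys()))
--     numberyaxis = [eventcount[t] for t in timexaxis]
--     return timexaxis, numberyaxis
-- ===== SOURCE B (Python) =====
-- def lineplot_filtered(filtered_data):
--     times = sorted(row[1].strip()[:24] for row in filtered_data)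
--     timexaxis = []
--     numberyaxis = []
--     for t in times:
--         if timexaxis and timexaxis[-1] == t:
--             numberyaxis[-1] += 1
--         else:
--             timexaxis.append(t)
--             numberyaxis.append(1)
--     return timexaxis, numberyaxis
-- ===== Notes on version B (the rewrite author's own statement) =====
-- stated objective: alternative
-- what changed: B sorts the full list of extracted timestamps once and counts consecutive runs in a single scan, instead of A's hash-dict counting pass followed by sorting the distinct keys and a lookup pass.
-- outside the precondition, e.g. on lineplot_filtered([['only-one-cell']]): A raises IndexError, B raises IndexError
import Mathlib
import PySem

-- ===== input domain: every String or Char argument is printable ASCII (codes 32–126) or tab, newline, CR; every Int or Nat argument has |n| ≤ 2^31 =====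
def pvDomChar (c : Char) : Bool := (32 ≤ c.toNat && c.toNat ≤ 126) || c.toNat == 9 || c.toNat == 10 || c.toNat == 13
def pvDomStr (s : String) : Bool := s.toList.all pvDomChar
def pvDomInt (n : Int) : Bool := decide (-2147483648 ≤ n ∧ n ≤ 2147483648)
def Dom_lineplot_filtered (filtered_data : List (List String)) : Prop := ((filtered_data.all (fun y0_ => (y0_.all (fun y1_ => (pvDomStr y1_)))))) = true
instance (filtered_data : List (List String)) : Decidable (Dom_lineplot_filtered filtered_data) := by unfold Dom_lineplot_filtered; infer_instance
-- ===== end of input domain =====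

-- B replaces A's dict-counting pass + key sort + lookup pass by one sort of all
-- extracted timestamps followed by a single run-length counting scan (alternative algorithm, similar cost).

-- shared key extraction: row[1].strip()[:24]
def pvKey (row : List String) : String :=
  PySem.Str.slice (PySem.Str.strip ((PySem.List.pyGet? row 1).getD "")) none (some 24)

-- ===== PORT A =====
def lineplot_filtered (filtered_data : List (List String)) : List String × List Int :=
  let eventcount := filtered_data.foldl (fun d row =>
      let time := pvKey row
      if d.contains time then d.insert time (d.getD time 0 + 1) else d.insert time 1)
    PySem.Dict.empty
  let timexaxis := PySem.List.sorted eventcount.keys (fun x => x) false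
  (timexaxis, timexaxis.map (fun t => eventcount.getD t 0))

-- ===== PORT B =====
-- loop state: (timexaxis, numberyaxis) kept REVERSED (append = cons, [-1] = head)
def pvStep (acc : List String × List Int) (t : String) : List String × List Int :=
  match acc.1 with
  | [] => (t :: acc.1, 1 :: acc.2)
  | x :: _ => if x = t then (acc.1, (acc.2.headI + 1) :: acc.2.tail) else (t :: acc.1, 1 :: acc.2)

def lineplot_filtered_alt (filtered_data : List (List String)) : List String × List Int :=
  let times := PySem.List.sorted (filtered_data.map pvKey) (fun x => x) false
  let p := times.foldl pvStep ([], [])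
  (p.1.reverse, p.2.reverse)

-- ===== PRECONDITION & SPEC =====
-- Pre_: every row must have at least two cells, otherwise row[1] raises IndexError in A (and in B).
def Pre_lineplot_filtered (filtered_data : List (List String)) : Prop :=
  ∀ row ∈ filtered_data, 2 ≤ row.length
instance (filtered_data : List (List String)) : Decidable (Pre_lineplot_filtered filtered_data) := by unfold Pre_lineplot_filtered; infer_instance
def pvWitness_lineplot_filtered : List (List String) := [["E1", "2024-01-01 10:00:00,123 INFO boot"], ["E2", "2024-01-01 10:00:00,123 INFO boot"]]

def Spec_lineplot_filtered (filtered_data : List (List String)) (out : List String × List Int) : Prop := out = lineplot_filtered_alt filtered_data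
instance (filtered_data : List (List String)) (out : List String × List Int) : Decidable (Spec_lineplot_filtered filtered_data out) := by unfold Spec_lineplot_filtered; infer_instance

-- ===== CLAIM (what is proved, stated in full; the proofs are below) =====
def Claim_equal_lineplot_filtered : Prop := ∀ (filtered_data : List (List String)), Dom_lineplot_filtered filtered_data → Pre_lineplot_filtered filtered_data → Spec_lineplot_filtered filtered_data (lineplot_filtered filtered_data)

-- ===== LEMMAS AND PROOFS =====

-- A's dict loop is Counter(map(pvKey, filtered_data))
theorem pvDictA_eq_counter (fd : List (List String)) :
    fd.foldl (fun d row =>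
      let time := pvKey row
      if d.contains time then d.insert time (d.getD time 0 + 1) else d.insert time 1)
      PySem.Dict.empty = PySem.Dict.counter (fd.map pvKey) := by
  have hstep : (fun (d : PySem.Dict String Int) (row : List String) =>
      let time := pvKey row
      if d.contains time then d.insert time (d.getD time 0 + 1) else d.insert time 1)
      = fun d row => d.insert (pvKey row) (d.getD (pvKey row) 0 + 1) := by
    funext d row
    by_cases h : d.contains (pvKey row)
    · simp [h]
    · have h0 : d.getD (pvKey row) 0 = 0 :=
        PySem.Dict.getD_of_not_contains d 0 (by simpa using h)
      simp [h, h0]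
  rw [hstep, ← List.foldl_map (f := pvKey)
      (g := fun (d : PySem.Dict String Int) x => d.insert x (d.getD x 0 + 1)),
    PySem.Dict.foldl_insert_getD_add_one_eq_counter]

-- keys of the run-length scan of a sorted list, skipping leading copies of x
def runKeys : List String → String → List String
  | [], _ => []
  | a :: t, x => if a = x then runKeys t x else a :: runKeys t a

theorem runKeys_gt : ∀ (s : List String) (x : String),
    s.Pairwise (· ≤ ·) → (∀ y ∈ s, x ≤ y) → ∀ z ∈ runKeys s x, x < z
  | [], _, _, _, z, hz => by simp [runKeys] at hz
  | a :: t, x, hp, hlb, z, hz => by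
    rw [List.pairwise_cons] at hp
    by_cases hax : a = x
    · rw [runKeys, if_pos hax] at hz
      exact runKeys_gt t x hp.2 (fun y hy => hlb y (List.mem_cons_of_mem _ hy)) z hz
    · rw [runKeys, if_neg hax, List.mem_cons] at hz
      have hxa : x < a := lt_of_le_of_ne (hlb a (List.mem_cons_self)) (fun h => hax h.symm)
      rcases hz with hz | hz
      · exact hz ▸ hxa
      · exact lt_trans hxa (runKeys_gt t a hp.2 hp.1 z hz)

theorem runKeys_pairwise : ∀ (s : List String) (x : String),
    s.Pairwise (· ≤ ·) → (runKeys s x).Pairwise (· < ·)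
  | [], _, _ => by simp [runKeys]
  | a :: t, x, hp => by
    rw [List.pairwise_cons] at hp
    by_cases hax : a = x
    · rw [runKeys, if_pos hax]; exact runKeys_pairwise t x hp.2
    · rw [runKeys, if_neg hax, List.pairwise_cons]
      exact ⟨fun z hz => runKeys_gt t a hp.2 hp.1 z hz, runKeys_pairwise t a hp.2⟩

theorem mem_runKeys : ∀ (s : List String) (x : String),
    s.Pairwise (· ≤ ·) → (∀ y ∈ s, x ≤ y) → ∀ z, (z ∈ runKeys s x ↔ z ∈ s ∧ z ≠ x)
  | [], _, _, _, z => by simp [runKeys]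
  | a :: t, x, hp, hlb, z => by
    rw [List.pairwise_cons] at hp
    by_cases hax : a = x
    · rw [runKeys, if_pos hax, mem_runKeys t x hp.2 (fun y hy => hlb y (List.mem_cons_of_mem _ hy))]
      subst hax
      constructor
      · rintro ⟨h1, h2⟩; exact ⟨List.mem_cons_of_mem _ h1, h2⟩
      · rintro ⟨h1, h2⟩
        rcases List.mem_cons.mp h1 with h | h
        · exact absurd h h2
        · exact ⟨h, h2⟩
    · have hxa : x < a := lt_of_le_of_ne (hlb a (List.mem_cons_self)) (fun h => hax h.symm)
      rw [runKeys, if_neg hax, List.mem_cons, mem_runKeys t a hp.2 hp.1]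
      constructor
      · rintro (h | ⟨h1, _⟩)
        · exact ⟨h ▸ List.mem_cons_self, h ▸ hax⟩
        · exact ⟨List.mem_cons_of_mem _ h1, fun hzx => absurd (hzx ▸ hp.1 z h1) (not_le.mpr hxa)⟩
      · rintro ⟨h1, h2⟩
        rcases List.mem_cons.mp h1 with h | h
        · exact Or.inl h
        · by_cases hza : z = a
          · exact Or.inl hza
          · exact Or.inr ⟨h, hza⟩

-- the invariant of B's counting scan
theorem pvFold_spec : ∀ (s : List String) (x : String) (c : Int) (xs : List String) (cs : List Int),
    s.Pairwise (· ≤ ·) → (∀ y ∈ s, x ≤ y) →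
    s.foldl pvStep (x :: xs, c :: cs) =
      ((runKeys s x).reverse ++ x :: xs,
       ((runKeys s x).map (fun t => (s.count t : Int))).reverse ++ (c + (s.count x : Int)) :: cs)
  | [], x, c, xs, cs, _, _ => by simp [runKeys]
  | a :: t, x, c, xs, cs, hp, hlb => by
    rw [List.pairwise_cons] at hp
    by_cases hax : a = x
    · subst hax
      have hlb' : ∀ y ∈ t, a ≤ y := fun y hy => hlb y (List.mem_cons_of_mem _ hy)
      have hmap : (runKeys t a).map (fun z => ((a :: t).count z : Int))
          = (runKeys t a).map (fun z => (t.count z : Int)) :=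
        List.map_congr_left (fun z hz => by
          have hza : a < z := runKeys_gt t a hp.2 hlb' z hz
          simp [hza.ne])
      rw [List.foldl_cons]
      show t.foldl pvStep (pvStep (a :: xs, c :: cs) a) = _
      rw [show pvStep (a :: xs, c :: cs) a = (a :: xs, (c + 1) :: cs) by
        unfold pvStep; simp]
      rw [pvFold_spec t a (c + 1) xs cs hp.2 hlb']
      rw [show runKeys (a :: t) a = runKeys t a from by rw [runKeys, if_pos rfl]]
      rw [hmap, List.count_cons_self]
      refine congrArg₂ _ rfl (congrArg₂ _ rfl (congrArg₂ _ ?_ rfl))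
      push_cast; ring
    · have hxa : x < a := lt_of_le_of_ne (hlb a (List.mem_cons_self)) (fun h => hax h.symm)
      have hxnt : x ∉ a :: t := by
        intro hx
        rcases List.mem_cons.mp hx with h | h
        · exact hax h.symm
        · exact absurd (hp.1 x h) (not_le.mpr hxa)
      have hmap : (runKeys t a).map (fun z => ((a :: t).count z : Int))
          = (runKeys t a).map (fun z => (t.count z : Int)) :=
        List.map_congr_left (fun z hz => by
          have hza : a < z := runKeys_gt t a hp.2 hp.1 z hz
          simp [hza.ne])
      have hcx : (a :: t).count x = 0 := List.count_eq_zero.mpr hxnt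
      rw [List.foldl_cons]
      show t.foldl pvStep (pvStep (x :: xs, c :: cs) a) = _
      rw [show pvStep (x :: xs, c :: cs) a = (a :: x :: xs, 1 :: c :: cs) by
        unfold pvStep
        simp only [if_neg (show ¬ x = a from fun h => hax h.symm)]]
      rw [pvFold_spec t a 1 (x :: xs) (c :: cs) hp.2 hp.1]
      rw [show runKeys (a :: t) x = a :: runKeys t a from by rw [runKeys, if_neg hax]]
      rw [hcx, List.map_cons, hmap, List.count_cons_self]
      refine congrArg₂ _ ?_ ?_
      · simp
      · simp only [List.reverse_cons, List.append_assoc, List.cons_append, List.nil_append]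
        refine congrArg₂ _ rfl (congrArg₂ _ ?_ (congrArg₂ _ ?_ rfl))
        · push_cast; ring
        · push_cast; ring

-- ===== VERDICT (by name: the statement is the Claim_ definition above) =====
theorem lineplot_filtered_spec : Claim_equal_lineplot_filtered := by
  intro fd _ _
  show lineplot_filtered fd = lineplot_filtered_alt fd
  simp only [lineplot_filtered, lineplot_filtered_alt]
  rw [pvDictA_eq_counter]
  set ts := fd.map pvKey with hts
  set s := PySem.List.sorted ts (fun x => x) false with hs
  have hperm : s.Perm ts := PySem.List.sorted_perm ts (fun x => x) false
  have hsp : s.Pairwise (· ≤ ·) := by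
    have := PySem.List.sorted_pairwise (xs := ts) (key := fun x => x)
    simpa [← hs] using this
  have hcount : ∀ z, s.count z = ts.count z := fun z => hperm.count_eq z
  rw [PySem.Dict.keys_counter]
  -- case on s
  cases hse : s with
  | nil =>
    have : ts = [] := by
      have := (PySem.List.sorted_eq_nil_iff (xs := ts) (key := fun x => x) (rev := false)).mp (by rw [← hs, hse])
      exact this
    rw [this]
    rfl
  | cons m rest =>
    have hpc : List.Pairwise (· ≤ ·) (m :: rest) := hse ▸ hsp
    rw [List.pairwise_cons] at hpc
    have hfold : (m :: rest).foldl pvStep ([], []) =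
        ((runKeys rest m).reverse ++ [m],
         ((runKeys rest m).map (fun t => (rest.count t : Int))).reverse ++ [1 + (rest.count m : Int)]) := by
      rw [List.foldl_cons]
      show rest.foldl pvStep ([m], [1]) = _
      rw [pvFold_spec rest m 1 [] [] hpc.2 hpc.1]
    rw [hfold]
    have hK : PySem.List.sorted (PySem.Set.ofList ts) (fun x => x) false = m :: runKeys rest m := by
      apply PySem.List.sorted_eq_of_perm_of_pairwise_lt
      · rw [List.perm_ext_iff_of_nodup]
        · intro z
          rw [PySem.Set.mem_ofList]
          have hmem : z ∈ ts ↔ z ∈ m :: rest := by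
            rw [← hse]; exact ⟨fun h => (hperm.mem_iff).mpr h, fun h => (hperm.mem_iff).mp h⟩
          rw [List.mem_cons, mem_runKeys rest m hpc.2 hpc.1, hmem, List.mem_cons]
          constructor
          · rintro (h | ⟨h1, _⟩)
            · exact Or.inl h
            · exact Or.inr h1
          · rintro (h | h)
            · exact Or.inl h
            · by_cases hzm : z = m
              · exact Or.inl hzm
              · exact Or.inr ⟨h, hzm⟩
        · rw [List.nodup_cons]
          refine ⟨?_, (runKeys_pairwise rest m hpc.2).imp (fun h => ne_of_lt h)⟩
          intro hm
          exact absurd (runKeys_gt rest m hpc.2 hpc.1 m hm) (lt_irrefl m)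
        · exact PySem.Set.nodup_ofList ts
      · rw [List.pairwise_cons]
        exact ⟨fun z hz => runKeys_gt rest m hpc.2 hpc.1 z hz, runKeys_pairwise rest m hpc.2⟩
    rw [hK]
    dsimp only
    simp only [List.map_cons, List.reverse_append, List.reverse_reverse, List.reverse_cons,
      List.reverse_nil, List.nil_append, List.cons_append]
    refine congrArg₂ _ rfl ?_
    refine congrArg₂ _ ?_ ?_
    · rw [PySem.Dict.getD_counter, ← hcount m, hse, List.count_cons_self]
      push_cast; ring
    · refine List.map_congr_left fun z hz => ?_
      have hzm : m < z := runKeys_gt rest m hpc.2 hpc.1 z hz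
      rw [PySem.Dict.getD_counter, ← hcount z, hse]
      simp [hzm.ne]
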